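-- pv_equiv track=rewrite | github.com/NatesVibeCode/Praxis | Code&DBs/Workflow/bin/praxis_sandbox_client.py | _match_tool_definition
-- ===== SOURCE A (Python) =====
-- from typing import Any
--
-- def _match_tool_definition(tools: list[dict[str, Any]], tool_name: str) -> dict[str, Any] | None:
--     candidates = [tool_name]
--     if not tool_name.startswith("praxis_"):
--         candidates.append(f"praxis_{tool_name}")
--
--     for candidate in candidates:
--         for tool in tools:
--             name = str(tool.get("name") or "").strip()
--             if name == candidate:
--                 return tool
--     return None
-- ===== SOURCE B (Python) =====
-- def _match_tool_definition(tools, tool_name):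
--     want_prefixed = not tool_name.startswith("praxis_")
--     prefixed = f"praxis_{tool_name}"
--     fallback = None
--     for tool in tools:
--         name = str(tool.get("name") or "").strip()
--         if name == tool_name:
--             return tool
--         if want_prefixed and fallback is None and name == prefixed:
--             fallback = tool
--     return fallback
-- ===== Notes on version B (the rewrite author's own statement) =====
-- stated objective: alternative
-- what changed: B makes one single pass over the tool list, returning immediately on an exact name match and remembering the first praxis-prefixed match in a fallback accumulator, instead of A's candidate loop that rescans the whole list once per candidate name.
import Mathlib
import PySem

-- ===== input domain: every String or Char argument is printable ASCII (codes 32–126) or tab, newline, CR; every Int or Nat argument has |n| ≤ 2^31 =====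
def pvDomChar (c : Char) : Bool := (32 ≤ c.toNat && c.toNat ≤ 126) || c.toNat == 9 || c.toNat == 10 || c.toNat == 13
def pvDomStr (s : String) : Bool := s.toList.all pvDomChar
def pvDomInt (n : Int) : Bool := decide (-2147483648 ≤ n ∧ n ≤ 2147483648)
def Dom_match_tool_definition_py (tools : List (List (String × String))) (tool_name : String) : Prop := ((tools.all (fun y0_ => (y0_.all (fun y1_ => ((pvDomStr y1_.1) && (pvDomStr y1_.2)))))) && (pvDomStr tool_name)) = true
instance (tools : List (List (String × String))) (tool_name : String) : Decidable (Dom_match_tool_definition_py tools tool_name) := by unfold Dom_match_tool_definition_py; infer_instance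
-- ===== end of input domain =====

-- B replaces A's per-candidate rescans with one single pass: early return on exact match, a fallback accumulator for the first praxis-prefixed match (alternative decomposition, same value).


-- ===== PORT A =====
-- name = str(tool.get("name") or "").strip()  (values are strings, so `or ""` only maps a missing/empty value to "")
def pvToolName (tool : List (String × String)) : String :=
  PySem.Str.strip ((PySem.Dict.mk tool).getD "name" "")

-- inner loop of A: first tool whose normalized name equals the candidate
def pvFindA (tools : List (List (String × String))) (cand : String) : Option (List (String × String)) :=
  match tools with
  | [] => none
  | t :: rest => if pvToolName t == cand then some t else pvFindA rest cand

-- outer loop of A over the candidate list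
def pvLoopA (cands : List String) (tools : List (List (String × String))) : Option (List (String × String)) :=
  match cands with
  | [] => none
  | c :: cs =>
    match pvFindA tools c with
    | some t => some t
    | none => pvLoopA cs tools

def match_tool_definition_py (tools : List (List (String × String))) (tool_name : String) : Option (List (String × String)) :=
  let candidates :=
    if PySem.Str.startswith tool_name "praxis_" then [tool_name]
    else [tool_name, "praxis_" ++ tool_name]
  pvLoopA candidates tools

-- ===== PORT B =====
-- B's single loop: return on exact match; the `fallback` accumulator keeps the first prefixed match
def pvScanB (tn pref : String) (wantP : Bool) (tools : List (List (String × String)))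
    (fb : Option (List (String × String))) : Option (List (String × String)) :=
  match tools with
  | [] => fb
  | t :: rest =>
    let name := pvToolName t
    if name == tn then some t
    else
      match fb with
      | none => if wantP && (name == pref) then pvScanB tn pref wantP rest (some t)
                else pvScanB tn pref wantP rest none
      | some f => pvScanB tn pref wantP rest (some f)

def match_tool_definition_py_alt (tools : List (List (String × String))) (tool_name : String) : Option (List (String × String)) :=
  let wantP := !(PySem.Str.startswith tool_name "praxis_")
  let pref := "praxis_" ++ tool_name
  pvScanB tool_name pref wantP tools none

-- ===== PRECONDITION & SPEC =====
def Spec_match_tool_definition_py (tools : List (List (String × String))) (tool_name : String) (out : Option (List (String × String))) : Prop := out = match_tool_definition_py_alt tools tool_name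
instance (tools : List (List (String × String))) (tool_name : String) (out : Option (List (String × String))) : Decidable (Spec_match_tool_definition_py tools tool_name out) := by unfold Spec_match_tool_definition_py; infer_instance

-- ===== CLAIM (what is proved, stated in full; the proofs are below) =====
def Claim_equal_match_tool_definition_py : Prop := ∀ (tools : List (List (String × String))) (tool_name : String), Dom_match_tool_definition_py tools tool_name → Spec_match_tool_definition_py tools tool_name (match_tool_definition_py tools tool_name)

-- ===== LEMMAS AND PROOFS =====

-- characterization of B's single pass: the exact-match scan dominates; otherwise fb, else the prefixed scan (when wanted)
theorem scanB_eq (tn pref : String) (wantP : Bool) (tools : List (List (String × String)))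
    (fb : Option (List (String × String))) :
    pvScanB tn pref wantP tools fb =
      match pvFindA tools tn with
      | some t => some t
      | none => fb.orElse (fun _ => if wantP then pvFindA tools pref else none) := by
  induction tools generalizing fb with
  | nil => cases fb <;> simp [pvScanB, pvFindA, Option.orElse]
  | cons t rest ih =>
    simp only [pvScanB, pvFindA]
    by_cases he : pvToolName t == tn
    · simp [he]
    · simp only [he, Bool.false_eq_true, if_false]
      simp only [ih]
      cases fb with
      | some f =>
        cases h : pvFindA rest tn <;> simp [h, Option.orElse]
      | none =>
        by_cases hp : wantP && (pvToolName t == pref)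
        · obtain ⟨hw, hm⟩ := Bool.and_eq_true_iff.mp hp
          cases h : pvFindA rest tn <;> simp [hp, h, Option.orElse, hw, hm]
        · cases h : pvFindA rest tn with
          | some v => simp [hp, h]
          | none =>
            cases hw : wantP with
            | false => simp [hp, h, Option.orElse, hw]
            | true =>
              have hm : (pvToolName t == pref) = false := by
                cases hmm : (pvToolName t == pref) with
                | false => rfl
                | true => exact absurd (by simp [hw, hmm]) hp
              simp [hp, h, Option.orElse, hm]

-- ===== VERDICT (by name: the statement is the Claim_ definition above) =====
theorem match_tool_definition_py_spec : Claim_equal_match_tool_definition_py := by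
  intro tools tool_name _
  unfold Spec_match_tool_definition_py match_tool_definition_py match_tool_definition_py_alt
  rw [scanB_eq]
  by_cases hs : PySem.Str.startswith tool_name "praxis_"
  · simp only [hs, if_true, Bool.not_true, Bool.false_eq_true, if_false]
    cases h : pvFindA tools tool_name <;> simp [pvLoopA, h, Option.orElse]
  · rw [Bool.not_eq_true] at hs
    simp only [hs, Bool.false_eq_true, if_false, Bool.not_false, if_true]
    cases h : pvFindA tools tool_name with
    | some t => simp [pvLoopA, h]
    | none =>
      cases h2 : pvFindA tools ("praxis_" ++ tool_name) <;>
        simp [pvLoopA, h, h2, Option.orElse]
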